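-- pv_equiv track=rewrite | github.com/Rubal0990/GFG-DSA | Even Swap - GFG/even-swap.py | lexicographicallyLargest
-- ===== SOURCE A (Python) =====
-- def lexicographicallyLargest(a, n):
--     i = 0
--     j = 1
--
--     while i < n - 1 and j < n:
--         if (a[i] + a[j]) % 2 == 0:
--             j += 1
--
--         else:
--             a[i:j] = sorted(a[i:j], reverse=True)
--             i = j
--             j += 1
--
--     if j == n:
--         a[i:j] = sorted(a[i:j], reverse=True)
--
--     return a
-- ===== SOURCE B (Python) =====
-- def lexicographicallyLargest(a, n):
--     # Tag each of the first n elements with a run id (incremented at every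
--     # parity change), then do ONE global stable sort of (id, value) pairs by
--     # (id, -value) and write the values back with a single slice assignment.
--     if n < 2:
--         return a
--     ids, r, prev = [], 0, None
--     for x in a[:n]:
--         if prev is not None and (x - prev) % 2 != 0:
--             r += 1
--         ids.append(r)
--         prev = x
--     a[:n] = [v for _, v in sorted(zip(ids, a[:n]), key=lambda t: (t[0], -t[1]))]
--     return a
-- ===== Notes on version B (the rewrite author's own statement) =====
-- stated objective: alternative
-- what changed: A walks two indices over the prefix and re-sorts each same-parity segment in place via repeated slice assignments; B instead tags every element with a run id (incremented at each parity change) and performs one single global stable sort of the (id, value) pairs by (id, -value), writing the values back with one slice assignment.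
import Mathlib
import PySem

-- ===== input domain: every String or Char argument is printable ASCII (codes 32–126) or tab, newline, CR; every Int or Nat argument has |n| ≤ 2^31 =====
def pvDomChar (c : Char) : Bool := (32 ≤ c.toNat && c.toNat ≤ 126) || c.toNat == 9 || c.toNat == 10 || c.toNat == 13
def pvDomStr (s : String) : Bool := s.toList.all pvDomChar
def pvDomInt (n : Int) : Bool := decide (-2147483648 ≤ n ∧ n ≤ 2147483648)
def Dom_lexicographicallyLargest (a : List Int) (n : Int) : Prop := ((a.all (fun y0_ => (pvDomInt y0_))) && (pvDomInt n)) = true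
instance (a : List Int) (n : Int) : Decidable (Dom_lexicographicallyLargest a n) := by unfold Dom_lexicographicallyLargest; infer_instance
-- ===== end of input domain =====

-- B replaces A's two-index in-place sorting of each same-parity segment by tagging every
-- prefix element with a run id and doing ONE global stable sort of the (id, value) pairs
-- by (id, -value).  (Both A and B mutate the argument list in place in Python; the
-- equivalence proved here is about the return value.)

-- ===== PORT A =====
-- sorted(l, reverse=True)
def pvSortDesc (l : List Int) : List Int := PySem.List.sorted l (fun x => x) true

-- Python slice assignment  a[i:j] = v  (result list)
def pvSetSlice (a : List Int) (i j : Int) (v : List Int) : List Int :=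
  PySem.List.slice a none (some i) ++ v ++ PySem.List.slice a (some j) none

-- the while loop of A: state (a, i, j); returns the final state
def lexALoop (a : List Int) (n i j : Int) : List Int × Int × Int :=
  if _h : i < n - 1 ∧ j < n then
    match PySem.List.pyGet? a i, PySem.List.pyGet? a j with
    | some ai, some aj =>
        if PySem.Int.mod (ai + aj) 2 = 0 then
          lexALoop a n i (j + 1)
        else
          lexALoop (pvSetSlice a i j (pvSortDesc (PySem.List.slice a (some i) (some j)))) n j (j + 1)
    | _, _ => (a, i, j)  -- Python raises IndexError here; such inputs are outside Pre_
  else (a, i, j)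
termination_by (n - j).toNat
decreasing_by all_goals omega

-- the loop followed by A's trailing 'if j == n' fix-up
def lexAFinish (a : List Int) (n i j : Int) : List Int :=
  let res := lexALoop a n i j
  if res.2.2 = n then
    pvSetSlice res.1 res.2.1 res.2.2
      (pvSortDesc (PySem.List.slice res.1 (some res.2.1) (some res.2.2)))
  else res.1

def lexicographicallyLargest (a : List Int) (n : Int) : List Int := lexAFinish a n 0 1

-- ===== PORT B =====
-- the tagging loop of B: state (ids, r, prev)
def lexTagStep (st : List Int × Int × Option Int) (x : Int) : List Int × Int × Option Int :=
  match st.2.2 with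
  | some p =>
      if PySem.Int.mod (x - p) 2 ≠ 0 then (st.1 ++ [st.2.1 + 1], st.2.1 + 1, some x)
      else (st.1 ++ [st.2.1], st.2.1, some x)
  | none => (st.1 ++ [st.2.1], st.2.1, some x)

def lexTag (xs : List Int) : List Int × Int × Option Int := xs.foldl lexTagStep ([], 0, none)

def lexicographicallyLargest_alt (a : List Int) (n : Int) : List Int :=
  if n < 2 then a
  else
    let pre := PySem.List.slice a none (some n)
    (PySem.List.sorted2 ((lexTag pre).1.zip pre) (fun t => t.1) (fun t => -t.2) false).map Prod.snd
      ++ PySem.List.slice a (some n) none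

-- ===== PRECONDITION & SPEC =====
-- Pre_ excludes exactly the inputs where A raises IndexError (n exceeds len(a) with n ≥ 2,
-- so the loop reads a[j] out of range); on every admitted input A returns normally.
def Pre_lexicographicallyLargest (a : List Int) (n : Int) : Prop :=
  n ≤ (a.length : Int) ∨ n ≤ 1
instance (a : List Int) (n : Int) : Decidable (Pre_lexicographicallyLargest a n) := by
  unfold Pre_lexicographicallyLargest; infer_instance

def pvWitness_lexicographicallyLargest : List Int × Int := ([5, 3, 2, 4, 1], 5)

def Spec_lexicographicallyLargest (a : List Int) (n : Int) (out : List Int) : Prop :=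
  out = lexicographicallyLargest_alt a n
instance (a : List Int) (n : Int) (out : List Int) : Decidable (Spec_lexicographicallyLargest a n out) := by
  unfold Spec_lexicographicallyLargest; infer_instance

-- ===== CLAIM (what is proved, stated in full; the proofs are below) =====
def Claim_equal_lexicographicallyLargest : Prop := ∀ (a : List Int) (n : Int), Dom_lexicographicallyLargest a n → Pre_lexicographicallyLargest a n → Spec_lexicographicallyLargest a n (lexicographicallyLargest a n)

-- ===== LEMMAS AND PROOFS =====

-- Python's (x + y) % 2 == 0 is parity agreement
lemma pvPar (x y : Int) : (PySem.Int.mod (x + y) 2 = 0) ↔ (PySem.Int.mod y 2 = PySem.Int.mod x 2) := by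
  simp only [PySem.Int.mod_eq_emod_of_pos (show (0:Int) < 2 by omega)]
  omega

-- Python's (x - y) % 2 != 0 is parity disagreement
lemma pvParSub (x y : Int) : (PySem.Int.mod (x - y) 2 ≠ 0) ↔ (PySem.Int.mod x 2 ≠ PySem.Int.mod y 2) := by
  simp only [PySem.Int.mod_eq_emod_of_pos (show (0:Int) < 2 by omega)]
  omega

-- a[i:j] for the exact middle block
lemma pvSliceMid (p r t : List Int) :
    PySem.List.slice (p ++ r ++ t) (some (p.length : Int)) (some ((p.length : Int) + (r.length : Int))) = r := by
  rw [PySem.List.slice_natCast_add, List.append_assoc, List.drop_left, List.take_left]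

-- a[i:j] = v for the exact middle block
lemma pvSetSliceMid (p r t v : List Int) :
    pvSetSlice (p ++ r ++ t) (p.length : Int) ((p.length : Int) + (r.length : Int)) v = p ++ v ++ t := by
  unfold pvSetSlice
  have h : ((p.length : Int) + (r.length : Int)) = ((p.length + r.length : Nat) : Int) := by push_cast; ring
  rw [h, PySem.List.slice_to_natCast, PySem.List.slice_from_natCast]
  have h1 : (p ++ r ++ t).take p.length = p := by
    rw [List.append_assoc]; exact List.take_left
  have h2 : (p ++ r ++ t).drop (p.length + r.length) = t := by
    rw [show p.length + r.length = (p ++ r).length by simp]; exact List.drop_left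
  rw [h1, h2]

lemma pvSortDescLen (l : List Int) : (pvSortDesc l).length = l.length := by
  simp only [pvSortDesc]; exact PySem.List.length_sorted l (fun x => x) true

-- run collector: the common intermediate form both proofs reduce A and B to
def lexBGo (xs : List Int) (run : List Int) (p : Int) (out : List Int) : List Int :=
  match xs with
  | [] => out ++ pvSortDesc run
  | x :: rest =>
      if PySem.Int.mod x 2 = p then lexBGo rest (run ++ [x]) p out
      else lexBGo rest [x] (PySem.Int.mod x 2) (out ++ pvSortDesc run)

-- one loop iteration of A, same-parity branch
lemma pvStepSkip (a : List Int) (n i j ai aj : Int) (h1 : i < n - 1) (h2 : j < n)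
    (hai : PySem.List.pyGet? a i = some ai) (haj : PySem.List.pyGet? a j = some aj)
    (hp : PySem.Int.mod (ai + aj) 2 = 0) :
    lexAFinish a n i j = lexAFinish a n i (j + 1) := by
  unfold lexAFinish
  conv_lhs => rw [lexALoop.eq_def]
  rw [dif_pos ⟨h1, h2⟩, hai, haj]
  simp only [hp, reduceIte]

-- one loop iteration of A, run-boundary branch
lemma pvStepSort (a : List Int) (n i j ai aj : Int) (h1 : i < n - 1) (h2 : j < n)
    (hai : PySem.List.pyGet? a i = some ai) (haj : PySem.List.pyGet? a j = some aj)
    (hp : ¬ PySem.Int.mod (ai + aj) 2 = 0) :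
    lexAFinish a n i j
      = lexAFinish (pvSetSlice a i j (pvSortDesc (PySem.List.slice a (some i) (some j)))) n j (j + 1) := by
  unfold lexAFinish
  conv_lhs => rw [lexALoop.eq_def]
  rw [dif_pos ⟨h1, h2⟩, hai, haj]
  simp only [hp, reduceIte]

-- loop exit when j = n
lemma pvExit (a : List Int) (n i j : Int) (hc : ¬ (i < n - 1 ∧ j < n)) (hj : j = n) :
    lexAFinish a n i j
      = pvSetSlice a i j (pvSortDesc (PySem.List.slice a (some i) (some j))) := by
  unfold lexAFinish
  rw [lexALoop.eq_def, dif_neg hc]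
  simp [hj]

-- A-side correspondence: A's loop-plus-fixup from a mid state equals the run collector
lemma pvLoopEq (s : List Int) : ∀ (p t rt : List Int) (rh : Int) (n i j : Int),
    i = (p.length : Int) → j = i + (rt.length : Int) + 1 → n = j + (s.length : Int) →
    lexAFinish (p ++ (rh :: rt) ++ s ++ t) n i j
      = lexBGo s (rh :: rt) (PySem.Int.mod rh 2) p ++ t := by
  induction s with
  | nil =>
    intro p t rt rh n i j hi hj hn
    simp only [List.length_nil, Nat.cast_zero, add_zero] at hn
    have hj2 : j = ((p.length : Int) + ((rh :: rt).length : Int)) := by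
      simp only [List.length_cons]; push_cast; omega
    rw [pvExit _ n i j (by omega) (by omega)]
    simp only [List.append_nil]
    rw [hi, hj2, pvSliceMid, pvSetSliceMid]
    simp [lexBGo, List.append_assoc]
  | cons x s' ih =>
    intro p t rt rh n i j hi hj hn
    simp only [List.length_cons] at hn
    push_cast at hn
    have h1 : i < n - 1 := by omega
    have h2 : j < n := by omega
    have hga : PySem.List.pyGet? (p ++ (rh :: rt) ++ (x :: s') ++ t) i = some rh := by
      have hrw : p ++ (rh :: rt) ++ (x :: s') ++ t = p ++ rh :: (rt ++ (x :: s') ++ t) := by simp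
      rw [hrw, hi]
      exact PySem.List.pyGet?_append_length p _ rh
    have hgj : PySem.List.pyGet? (p ++ (rh :: rt) ++ (x :: s') ++ t) j = some x := by
      have hrw : p ++ (rh :: rt) ++ (x :: s') ++ t = (p ++ rh :: rt) ++ x :: (s' ++ t) := by simp
      have hjl : j = (((p ++ rh :: rt).length : Nat) : Int) := by
        simp only [List.length_append, List.length_cons]; push_cast; omega
      rw [hrw, hjl]
      exact PySem.List.pyGet?_append_length (p ++ rh :: rt) _ x
    by_cases hpar : PySem.Int.mod (rh + x) 2 = 0
    · rw [pvStepSkip _ n i j rh x h1 h2 hga hgj hpar]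
      have ha' : p ++ (rh :: rt) ++ (x :: s') ++ t = p ++ (rh :: (rt ++ [x])) ++ s' ++ t := by simp
      rw [ha']
      rw [ih p t (rt ++ [x]) rh n i (j + 1) hi
            (by simp only [List.length_append, List.length_cons, List.length_nil]; push_cast; omega)
            (by omega)]
      simp only [lexBGo]
      rw [if_pos ((pvPar rh x).mp hpar)]
      simp
    · rw [pvStepSort _ n i j rh x h1 h2 hga hgj hpar]
      have hj2 : j = ((p.length : Int) + (((rh :: rt).length : Nat) : Int)) := by
        simp only [List.length_cons]; push_cast; omega
      have hregroup : p ++ (rh :: rt) ++ (x :: s') ++ t = p ++ (rh :: rt) ++ ((x :: s') ++ t) := by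
        simp [List.append_assoc]
      rw [hi, hj2, hregroup, pvSliceMid, pvSetSliceMid]
      have hshape : p ++ pvSortDesc (rh :: rt) ++ ((x :: s') ++ t)
          = (p ++ pvSortDesc (rh :: rt)) ++ (x :: ([] : List Int)) ++ s' ++ t := by
        simp [List.append_assoc]
      rw [hshape]
      rw [ih (p ++ pvSortDesc (rh :: rt)) t [] x n ((p.length : Int) + (((rh :: rt).length : Nat) : Int))
            (((p.length : Int) + (((rh :: rt).length : Nat) : Int)) + 1)
            (by simp only [List.length_append, pvSortDescLen, List.length_cons]; push_cast; omega)
            (by simp only [List.length_nil]; omega)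
            (by omega)]
      simp only [lexBGo]
      rw [if_neg (fun hc => hpar ((pvPar rh x).mpr hc))]

-- ========== B-side: the global stable sort equals the run collector ==========

-- (id, value) pairs as B's tag loop produces them, given current id r and previous value p
def tagGo : List Int → Int → Int → List (Int × Int)
  | [], _, _ => []
  | x :: xs, r, p =>
      if PySem.Int.mod (x - p) 2 ≠ 0 then (r + 1, x) :: tagGo xs (r + 1) x
      else (r, x) :: tagGo xs r x

-- the intended sorted pair list: runs in order, each sorted descending, tagged with run ids
def lexQ : List Int → List Int → Int → Int → List (Int × Int)
  | [], run, rid, _ => (pvSortDesc run).map (fun v => (rid, v))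
  | x :: xs, run, rid, p =>
      if PySem.Int.mod x 2 = p then lexQ xs (run ++ [x]) rid p
      else (pvSortDesc run).map (fun v => (rid, v)) ++ lexQ xs [x] (rid + 1) (PySem.Int.mod x 2)

-- lexicographic ≤ on pairs under key (id, -value)
def lexLe (s t : Int × Int) : Prop := s.1 < t.1 ∨ (s.1 = t.1 ∧ t.2 ≤ s.2)

-- the boolean comparison sorted2 uses for keys (·.1) and (fun t => -t.2)
def pvLt2 (s t : Int × Int) : Bool :=
  decide (s.1 < t.1) || (!decide (t.1 < s.1) && decide (-s.2 < -t.2))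

lemma tagGo_snd (xs : List Int) : ∀ r p, (tagGo xs r p).map Prod.snd = xs := by
  induction xs with
  | nil => intro r p; rfl
  | cons x xs ih =>
    intro r p
    unfold tagGo
    split_ifs <;> simp [ih]

lemma zip_fst_snd (t : List (Int × Int)) : (t.map Prod.fst).zip (t.map Prod.snd) = t := by
  induction t with
  | nil => rfl
  | cons q t ih => simp [ih]

lemma lexTag_fold (xs : List Int) : ∀ acc r p,
    (xs.foldl lexTagStep (acc, r, some p)).1 = acc ++ (tagGo xs r p).map Prod.fst := by
  induction xs with
  | nil => intro acc r p; simp [tagGo]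
  | cons x xs ih =>
    intro acc r p
    rw [List.foldl_cons]
    have hstep : lexTagStep (acc, r, some p) x
        = if PySem.Int.mod (x - p) 2 ≠ 0 then (acc ++ [r + 1], r + 1, some x)
          else (acc ++ [r], r, some x) := rfl
    rw [hstep]
    unfold tagGo
    split_ifs with h
    · rw [ih]; simp
    · rw [ih]; simp

lemma lexBGo_out (xs : List Int) : ∀ run p out, lexBGo xs run p out = out ++ lexBGo xs run p [] := by
  induction xs with
  | nil => intro run p out; simp [lexBGo]
  | cons x xs ih =>
    intro run p out
    unfold lexBGo
    split_ifs with h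
    · exact ih _ _ _
    · rw [ih _ _ (out ++ pvSortDesc run), ih _ _ ([] ++ pvSortDesc run)]
      simp

lemma lexQ_snd (xs : List Int) : ∀ run rid p, (lexQ xs run rid p).map Prod.snd = lexBGo xs run p [] := by
  induction xs with
  | nil =>
    intro run rid p
    simp [lexQ, lexBGo, List.map_map, Function.comp_def]
  | cons x xs ih =>
    intro run rid p
    unfold lexQ lexBGo
    split_ifs with h
    · exact ih _ _ _
    · rw [lexBGo_out xs [x] (PySem.Int.mod x 2) ([] ++ pvSortDesc run)]
      simp [ih, List.map_map, Function.comp_def]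

lemma lexQ_fst_ge (xs : List Int) : ∀ run rid p q, q ∈ lexQ xs run rid p → rid ≤ q.1 := by
  induction xs with
  | nil =>
    intro run rid p q hq
    simp only [lexQ, List.mem_map] at hq
    obtain ⟨v, _, rfl⟩ := hq; exact le_refl _
  | cons x xs ih =>
    intro run rid p q hq
    unfold lexQ at hq
    split_ifs at hq with h
    · exact ih _ _ _ _ hq
    · rcases List.mem_append.mp hq with hq | hq
      · simp only [List.mem_map] at hq
        obtain ⟨v, _, rfl⟩ := hq; exact le_refl _
      · have := ih _ _ _ _ hq; omega

lemma lexQ_block_pairwise (run : List Int) (rid : Int) :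
    List.Pairwise lexLe ((pvSortDesc run).map (fun v => (rid, v))) := by
  rw [List.pairwise_map]
  have h := PySem.List.sorted_pairwise_rev run (fun x => x)
  exact h.imp (fun hba => Or.inr ⟨rfl, hba⟩)

lemma lexQ_pairwise (xs : List Int) : ∀ run rid p, List.Pairwise lexLe (lexQ xs run rid p) := by
  induction xs with
  | nil => intro run rid p; exact lexQ_block_pairwise run rid
  | cons x xs ih =>
    intro run rid p
    unfold lexQ
    split_ifs with h
    · exact ih _ _ _
    · rw [List.pairwise_append]
      refine ⟨lexQ_block_pairwise run rid, ih _ _ _, ?_⟩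
      intro s hs t ht
      simp only [List.mem_map] at hs
      obtain ⟨v, _, rfl⟩ := hs
      have := lexQ_fst_ge xs [x] (rid + 1) (PySem.Int.mod x 2) t ht
      exact Or.inl (by omega)

-- permutation: lexQ rearranges the tagged pairs
lemma lexQ_perm (xs : List Int) : ∀ (run : List Int) (rid prev : Int),
    (lexQ xs run rid (PySem.Int.mod prev 2)).Perm
      (run.map (fun v => (rid, v)) ++ tagGo xs rid prev) := by
  induction xs with
  | nil =>
    intro run rid prev
    simp only [lexQ, tagGo, List.append_nil]
    exact ((PySem.List.sorted_perm run (fun x => x) true).map _)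
  | cons x xs ih =>
    intro run rid prev
    unfold lexQ tagGo
    by_cases h : PySem.Int.mod x 2 = PySem.Int.mod prev 2
    · rw [if_pos h, if_neg (by simpa using (not_iff_not.mpr (pvParSub x prev)).mpr (by simpa using h))]
      have hih := ih (run ++ [x]) rid x
      rw [h] at hih
      simpa using hih
    · rw [if_neg h, if_pos ((pvParSub x prev).mpr h)]
      have hperm : ((pvSortDesc run).map (fun v => (rid, v))).Perm (run.map (fun v => (rid, v))) :=
        (PySem.List.sorted_perm run (fun x => x) true).map _
      refine (hperm.append (ih [x] (rid + 1) x)).trans ?_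
      simp

-- pvLt2 true is strict lexicographic <
lemma pvLt2_true {s t : Int × Int} (h : pvLt2 s t = true) :
    s.1 < t.1 ∨ (s.1 = t.1 ∧ t.2 < s.2) := by
  unfold pvLt2 at h
  simp only [Bool.or_eq_true, Bool.and_eq_true, Bool.not_eq_true', decide_eq_true_eq,
    decide_eq_false_iff_not] at h
  omega

-- pvLt2 false gives the reverse lexLe
lemma pvLt2_false {s t : Int × Int} (h : pvLt2 s t = false) : lexLe t s := by
  unfold pvLt2 at h
  simp only [Bool.or_eq_false_iff, Bool.and_eq_false_iff, Bool.not_eq_false', decide_eq_true_eq,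
    decide_eq_false_iff_not] at h
  unfold lexLe; omega

lemma lexLe_trans {s t u : Int × Int} (h1 : lexLe s t) (h2 : lexLe t u) : lexLe s u := by
  unfold lexLe at *; omega

lemma insertBy_lex_pairwise (x : Int × Int) (ys : List (Int × Int))
    (h : List.Pairwise lexLe ys) :
    List.Pairwise lexLe (PySem.List.insertBy pvLt2 x ys) := by
  induction ys with
  | nil => simp [PySem.List.insertBy]
  | cons y ys ih =>
    unfold PySem.List.insertBy
    rcases List.pairwise_cons.mp h with ⟨hy, hys⟩
    by_cases hb : pvLt2 x y = true
    · rw [if_pos hb]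
      refine List.pairwise_cons.mpr ⟨?_, h⟩
      intro z hz
      have hxy : lexLe x y := by
        rcases pvLt2_true hb with h' | h'
        · exact Or.inl h'
        · exact Or.inr ⟨h'.1, le_of_lt h'.2⟩
      rcases hz with _ | hz
      · exact hxy
      · exact lexLe_trans hxy (hy _ (by assumption))
    · rw [if_neg hb]
      refine List.pairwise_cons.mpr ⟨?_, ih hys⟩
      intro z hz
      rcases (PySem.List.insertBy_mem_iff pvLt2 x z ys).mp hz with rfl | hz
      · exact pvLt2_false (Bool.eq_false_iff.mpr hb)
      · exact hy _ hz

lemma foldl_insert_lex_pairwise (xs : List (Int × Int)) : ∀ acc,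
    List.Pairwise lexLe acc →
    List.Pairwise lexLe (xs.foldl (fun acc x => PySem.List.insertBy pvLt2 x acc) acc) := by
  induction xs with
  | nil => intro acc h; exact h
  | cons x xs ih =>
    intro acc h
    exact ih _ (insertBy_lex_pairwise x acc h)

lemma sorted2_eq_foldl (xs : List (Int × Int)) :
    PySem.List.sorted2 xs (fun t => t.1) (fun t => -t.2) false
      = xs.foldl (fun acc x => PySem.List.insertBy pvLt2 x acc) [] := rfl

lemma lexLe_antisymm {s t : Int × Int} (h1 : lexLe s t) (h2 : lexLe t s) : s = t := by
  unfold lexLe at *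
  have : s.1 = t.1 ∧ s.2 = t.2 := by omega
  exact Prod.ext this.1 this.2

-- the global stable sort by (id, -value) IS the run-by-run descending arrangement
lemma sorted2_eq_lexQ (xs : List Int) (x0 : Int) :
    PySem.List.sorted2 ((0, x0) :: tagGo xs 0 x0) (fun t => t.1) (fun t => -t.2) false
      = lexQ xs [x0] 0 (PySem.Int.mod x0 2) := by
  have hperm : (PySem.List.sorted2 ((0, x0) :: tagGo xs 0 x0) (fun t => t.1) (fun t => -t.2) false).Perm
      (lexQ xs [x0] 0 (PySem.Int.mod x0 2)) := by
    refine (PySem.List.sorted2_perm _ _ _ _).trans ?_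
    have h := lexQ_perm xs [x0] 0 x0
    simpa using h.symm
  have hs1 : List.Pairwise lexLe
      (PySem.List.sorted2 ((0, x0) :: tagGo xs 0 x0) (fun t => t.1) (fun t => -t.2) false) := by
    rw [sorted2_eq_foldl]
    exact foldl_insert_lex_pairwise _ [] (by simp)
  have hs2 : List.Pairwise lexLe (lexQ xs [x0] 0 (PySem.Int.mod x0 2)) :=
    lexQ_pairwise xs [x0] 0 (PySem.Int.mod x0 2)
  exact List.Perm.eq_of_pairwise (fun a b _ _ h1 h2 => lexLe_antisymm h1 h2) hs1 hs2 hperm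

-- ===== VERDICT (by name: the statement is the Claim_ definition above) =====
theorem lexicographicallyLargest_spec : Claim_equal_lexicographicallyLargest := by
  intro a n _ hpre
  unfold Spec_lexicographicallyLargest lexicographicallyLargest lexicographicallyLargest_alt
  by_cases h2 : n < 2
  · rw [if_pos h2]
    unfold lexAFinish
    rw [lexALoop.eq_def, dif_neg (by omega)]
    simp only
    by_cases hn1 : (1 : Int) = n
    · rw [if_pos hn1]
      cases a with
      | nil => simp [pvSetSlice, pvSortDesc, PySem.List.sorted, PySem.List.slice]
      | cons y ys =>
        have hsl : PySem.List.slice (y :: ys) (some 0) (some 1) = [y] := by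
          rw [PySem.List.slice_toNat (y :: ys) (by omega) (by omega)]
          rfl
        rw [hsl]
        have hsd : pvSortDesc [y] = [y] := rfl
        rw [hsd]
        unfold pvSetSlice
        rw [PySem.List.slice_to (y :: ys) (by omega), PySem.List.slice_from (y :: ys) (by omega)]
        rfl
    · rw [if_neg hn1]
  · rw [if_neg h2]
    cases a with
    | nil =>
      exfalso
      unfold Pre_lexicographicallyLargest at hpre
      simp at hpre; omega
    | cons a0 as =>
      have hlen : n ≤ (as.length : Int) + 1 := by
        unfold Pre_lexicographicallyLargest at hpre
        simp at hpre; omega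
      have hk : (n.toNat - 1) ≤ as.length := by omega
      -- the prefix a[:n] and suffix a[n:]
      have hpre1 : PySem.List.slice (a0 :: as) none (some n) = a0 :: as.take (n.toNat - 1) := by
        rw [PySem.List.slice_to (a0 :: as) (by omega)]
        have : n.toNat = (n.toNat - 1) + 1 := by omega
        rw [this, List.take_succ_cons]
        simp
      have hs2 : PySem.List.slice (a0 :: as) (some n) none = as.drop (n.toNat - 1) := by
        rw [PySem.List.slice_from (a0 :: as) (by omega)]
        have : n.toNat = (n.toNat - 1) + 1 := by omega
        rw [this, List.drop_succ_cons]
        simp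
      -- B side: reduce the tag-and-sort expression to the run collector
      have hids : (lexTag (a0 :: as.take (n.toNat - 1))).1
          = 0 :: (tagGo (as.take (n.toNat - 1)) 0 a0).map Prod.fst := by
        unfold lexTag
        rw [List.foldl_cons]
        have hstep : lexTagStep ([], 0, none) a0 = ([0], 0, some a0) := rfl
        rw [hstep, lexTag_fold]
        rfl
      have hzip : (lexTag (a0 :: as.take (n.toNat - 1))).1.zip (a0 :: as.take (n.toNat - 1))
          = (0, a0) :: tagGo (as.take (n.toNat - 1)) 0 a0 := by
        rw [hids, List.zip_cons_cons]
        nth_rewrite 2 [← tagGo_snd (as.take (n.toNat - 1)) 0 a0]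
        rw [zip_fst_snd]
      have hB : (PySem.List.sorted2 ((lexTag (PySem.List.slice (a0 :: as) none (some n))).1.zip
              (PySem.List.slice (a0 :: as) none (some n))) (fun t => t.1) (fun t => -t.2) false).map Prod.snd
          = lexBGo (as.take (n.toNat - 1)) [a0] (PySem.Int.mod a0 2) [] := by
        rw [hpre1, hzip, sorted2_eq_lexQ, lexQ_snd]
      -- A side: the two-index loop equals the run collector
      have ha : a0 :: as = ([] : List Int) ++ (a0 :: ([] : List Int)) ++ as.take (n.toNat - 1) ++ as.drop (n.toNat - 1) := by
        simp
      conv_lhs => rw [ha]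
      rw [pvLoopEq (as.take (n.toNat - 1)) [] (as.drop (n.toNat - 1)) [] a0 n 0 1
            (by simp) (by simp) (by simp [List.length_take]; omega)]
      simp only [hs2, hB]
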